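-- pv_equiv track=rewrite | github.com/shawkridge/athena | src/athena/skills/executor.py | _split_generic_params
-- ===== SOURCE A (Python) =====
-- def _split_generic_params(params_str: str, split_all: bool = False) -> list[str]:
--     """Split generic type parameters, respecting nested brackets.
--
--     Examples:
--         'str, int' → ['str', 'int']
--         'List[str], Dict[str,int]' → ['List[str]', 'Dict[str,int]']
--     """
--     params = []
--     current = []
--     depth = 0
--
--     for char in params_str:
--         if char in "[{(":
--             depth += 1
--             current.append(char)
--         elif char in "]})":
--             depth -= 1
--             current.append(char)
--         elif char == "," and depth == 0:
--             param = "".join(current).strip()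
--             if param:
--                 params.append(param)
--             current = []
--         else:
--             current.append(char)
--
--     if current:
--         param = "".join(current).strip()
--         if param:
--             params.append(param)
--
--     return params
-- ===== SOURCE B (Python) =====
-- def _split_generic_params(params_str: str, split_all: bool = False) -> list[str]:
--     # Pass 1: record indices of commas at bracket depth 0.
--     cuts = []
--     depth = 0
--     for i, ch in enumerate(params_str):
--         if ch in "[{(":
--             depth += 1
--         elif ch in "]})":
--             depth -= 1
--         elif ch == "," and depth == 0:
--             cuts.append(i)
--     # Pass 2: slice between successive cut points, strip, drop empties.
--     params = []
--     start = 0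
--     for cut in cuts + [len(params_str)]:
--         piece = params_str[start:cut].strip()
--         if piece:
--             params.append(piece)
--         start = cut + 1
--     return params
-- ===== Notes on version B (the rewrite author's own statement) =====
-- stated objective: alternative
-- what changed: Replaces A's per-character buffer accumulation with a two-phase cut-point scheme: one depth-tracking pass records the indices of top-level commas, then a second phase slices the string between successive cut points, stripping and dropping empty pieces.
import Mathlib
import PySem

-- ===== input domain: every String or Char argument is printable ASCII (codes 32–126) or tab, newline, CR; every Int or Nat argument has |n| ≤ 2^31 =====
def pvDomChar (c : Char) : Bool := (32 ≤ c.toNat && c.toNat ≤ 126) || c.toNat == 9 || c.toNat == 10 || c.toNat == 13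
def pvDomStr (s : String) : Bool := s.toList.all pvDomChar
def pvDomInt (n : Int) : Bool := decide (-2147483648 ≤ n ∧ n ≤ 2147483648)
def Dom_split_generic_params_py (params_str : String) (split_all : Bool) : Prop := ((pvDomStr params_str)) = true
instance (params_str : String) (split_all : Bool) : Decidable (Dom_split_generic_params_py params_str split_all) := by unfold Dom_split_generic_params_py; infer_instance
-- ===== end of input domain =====

-- B replaces A's per-character buffer accumulation with a two-phase cut-point scheme
-- (record top-level comma indices, then slice/strip/filter); alternative decomposition, same cost.


-- ===== PORT A =====
-- A's single loop: state (params, current buffer, depth); at a top-level comma, strip the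
-- buffer, append if non-empty, reset; at the end, flush a non-empty buffer the same way.
def pvA_loop : List Char → List String → List Char → Int → List String
  | [], params, current, _ =>
      if current ≠ [] then
        let param := PySem.Chars.strip current
        if param ≠ [] then params ++ [String.ofList param] else params
      else params
  | c :: rest, params, current, depth =>
      if c = '[' ∨ c = '{' ∨ c = '(' then
        pvA_loop rest params (current ++ [c]) (depth + 1)
      else if c = ']' ∨ c = '}' ∨ c = ')' then
        pvA_loop rest params (current ++ [c]) (depth - 1)
      else if c = ',' ∧ depth = 0 then
        let param := PySem.Chars.strip current
        pvA_loop rest (if param ≠ [] then params ++ [String.ofList param] else params) [] depth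
      else
        pvA_loop rest params (current ++ [c]) depth

def split_generic_params_py (params_str : String) (split_all : Bool) : List String :=
  pvA_loop params_str.toList [] [] 0

-- ===== PORT B =====
-- Pass 1 of Source B: indices of commas at depth 0 (i is the enumerate index).
def pvB_cuts : List Char → Int → Nat → List Nat
  | [], _, _ => []
  | c :: rest, depth, i =>
      if c = '[' ∨ c = '{' ∨ c = '(' then pvB_cuts rest (depth + 1) (i + 1)
      else if c = ']' ∨ c = '}' ∨ c = ')' then pvB_cuts rest (depth - 1) (i + 1)
      else if c = ',' ∧ depth = 0 then i :: pvB_cuts rest depth (i + 1)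
      else pvB_cuts rest depth (i + 1)

-- Pass 2 of Source B: for each boundary, slice params_str[start:cut], strip, keep if non-empty.
def pvB_emit (s : List Char) : List Nat → Nat → List String → List String
  | [], _, params => params
  | cut :: more, start, params =>
      let piece := PySem.Chars.strip (PySem.List.slice s (some (start : Int)) (some (cut : Int)))
      pvB_emit s more (cut + 1) (if piece ≠ [] then params ++ [String.ofList piece] else params)

def split_generic_params_py_alt (params_str : String) (split_all : Bool) : List String :=
  let s := params_str.toList
  pvB_emit s (pvB_cuts s 0 0 ++ [s.length]) 0 []

-- ===== PRECONDITION & SPEC =====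
def Spec_split_generic_params_py (params_str : String) (split_all : Bool) (out : List String) : Prop := out = split_generic_params_py_alt params_str split_all
instance (params_str : String) (split_all : Bool) (out : List String) : Decidable (Spec_split_generic_params_py params_str split_all out) := by unfold Spec_split_generic_params_py; infer_instance

-- ===== CLAIM (what is proved, stated in full; the proofs are below) =====
def Claim_equal_split_generic_params_py : Prop := ∀ (params_str : String) (split_all : Bool), Dom_split_generic_params_py params_str split_all → Spec_split_generic_params_py params_str split_all (split_generic_params_py params_str split_all)

-- ===== LEMMAS AND PROOFS =====

-- Common semantic skeleton: (head segment, later segments) split at top-level commas.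
def pvSegs : List Char → Int → List Char × List (List Char)
  | [], _ => ([], [])
  | c :: rest, d =>
      if c = '[' ∨ c = '{' ∨ c = '(' then
        let r := pvSegs rest (d + 1); (c :: r.1, r.2)
      else if c = ']' ∨ c = '}' ∨ c = ')' then
        let r := pvSegs rest (d - 1); (c :: r.1, r.2)
      else if c = ',' ∧ d = 0 then
        let r := pvSegs rest d; ([], r.1 :: r.2)
      else
        let r := pvSegs rest d; (c :: r.1, r.2)

-- strip each segment, keep the non-empty ones.
def pvF : List (List Char) → List String
  | [] => []
  | seg :: rest =>
      let p := PySem.Chars.strip seg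
      if p ≠ [] then String.ofList p :: pvF rest else pvF rest

lemma pvF_cons (seg : List Char) (rest : List (List Char)) :
    pvF (seg :: rest) = (if PySem.Chars.strip seg ≠ [] then [String.ofList (PySem.Chars.strip seg)] else []) ++ pvF rest := by
  simp only [pvF]; split_ifs <;> simp

lemma pvA_loop_eq (cs : List Char) : ∀ (ps : List String) (cur : List Char) (d : Int),
    pvA_loop cs ps cur d = ps ++ pvF ((cur ++ (pvSegs cs d).1) :: (pvSegs cs d).2) := by
  induction cs with
  | nil =>
      intro ps cur d
      simp only [pvA_loop, pvSegs, List.append_nil, pvF]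
      by_cases h : cur = []
      · subst h
        have hs : PySem.Chars.strip ([] : List Char) = [] := rfl
        simp [hs]
      · simp only [h, ne_eq, not_false_eq_true, if_true]
        split_ifs <;> simp
  | cons c rest ih =>
      intro ps cur d
      simp only [pvA_loop, pvSegs]
      by_cases h1 : c = '[' ∨ c = '{' ∨ c = '('
      · simp only [if_pos h1]; rw [ih]; simp [List.append_assoc]
      · by_cases h2 : c = ']' ∨ c = '}' ∨ c = ')'
        · simp only [if_neg h1, if_pos h2]; rw [ih]; simp [List.append_assoc]
        · by_cases h3 : c = ',' ∧ d = 0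
          · simp only [if_neg h1, if_neg h2, if_pos h3]
            rw [ih]
            simp only [pvF_cons, List.nil_append, List.append_nil]
            split_ifs <;> simp_all
          · simp only [if_neg h1, if_neg h2, if_neg h3]
            rw [ih]; simp [List.append_assoc]

lemma pvSlice_nil (s : List Char) (i : Nat) :
    PySem.List.slice s (some (i : Int)) (some (i : Int)) = [] := by
  rw [PySem.List.slice_natCast]; simp

lemma pvSlice_snoc (s : List Char) (p0 i : Nat) (c : Char) (rest : List Char)
    (h : s.drop i = c :: rest) (hp : p0 ≤ i) :
    PySem.List.slice s (some (p0 : Int)) (some ((i + 1 : Nat) : Int)) =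
      PySem.List.slice s (some (p0 : Int)) (some (i : Int)) ++ [c] := by
  rw [PySem.List.slice_natCast, PySem.List.slice_natCast]
  have h1 : i + 1 - p0 = (i - p0) + 1 := by omega
  have h3 : s[i]? = some c := by
    have h0 : (s.drop i)[0]? = s[i + 0]? := List.getElem?_drop
    rw [h] at h0
    simpa using h0.symm
  have h2 : (s.drop p0)[i - p0]? = some c := by
    rw [List.getElem?_drop, show p0 + (i - p0) = i by omega, h3]
  rw [h1, List.take_add_one, h2]
  simp

lemma pvSlice_full (s : List Char) (p0 i : Nat) (h : s.drop i = []) (hp : p0 ≤ i) :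
    PySem.List.slice s (some (p0 : Int)) (some (s.length : Int)) =
      PySem.List.slice s (some (p0 : Int)) (some (i : Int)) := by
  rw [PySem.List.slice_natCast, PySem.List.slice_natCast]
  have hlen : s.length ≤ i := by
    by_contra hle
    have hne : s.drop i ≠ [] := by
      intro hnil
      have hl : (s.drop i).length = s.length - i := List.length_drop
      rw [hnil] at hl
      simp at hl
      omega
    exact hne h
  have hd : (s.drop p0).length = s.length - p0 := List.length_drop
  rw [List.take_of_length_le (by omega), List.take_of_length_le (by omega)]

lemma pvB_emit_eq (cs : List Char) (s : List Char) : ∀ (i : Nat) (d : Int) (ps : List String) (p0 : Nat),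
    s.drop i = cs → p0 ≤ i →
    pvB_emit s (pvB_cuts cs d i ++ [s.length]) p0 ps =
      ps ++ pvF ((PySem.List.slice s (some (p0 : Int)) (some (i : Int)) ++ (pvSegs cs d).1) :: (pvSegs cs d).2) := by
  induction cs with
  | nil =>
      intro i d ps p0 h hp
      simp only [pvB_cuts, pvSegs, List.nil_append, pvB_emit, List.append_nil, pvF]
      rw [pvSlice_full s p0 i h hp]
      split_ifs <;> simp_all
  | cons c rest ih =>
      intro i d ps p0 h hp
      have hdrop : s.drop (i + 1) = rest := by
        have h0 := congrArg (List.drop 1) h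
        simpa [List.drop_drop] using h0
      simp only [pvB_cuts, pvSegs]
      split_ifs with h1 h2 h3
      · rw [ih (i + 1) (d + 1) ps p0 hdrop (by omega), pvSlice_snoc s p0 i c rest h hp]
        simp [List.append_assoc]
      · rw [ih (i + 1) (d - 1) ps p0 hdrop (by omega), pvSlice_snoc s p0 i c rest h hp]
        simp [List.append_assoc]
      · simp only [List.cons_append, pvB_emit]
        rw [ih (i + 1) d _ (i + 1) hdrop (by omega), pvSlice_nil s (i + 1)]
        simp only [pvF_cons, List.append_nil, List.nil_append]
        split_ifs <;> simp_all
      · rw [ih (i + 1) d ps p0 hdrop (by omega), pvSlice_snoc s p0 i c rest h hp]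
        simp [List.append_assoc]

-- ===== VERDICT (by name: the statement is the Claim_ definition above) =====
theorem split_generic_params_py_spec : Claim_equal_split_generic_params_py := by
  intro params_str split_all _
  unfold Spec_split_generic_params_py split_generic_params_py split_generic_params_py_alt
  rw [pvA_loop_eq, pvB_emit_eq params_str.toList params_str.toList 0 0 [] 0 (by simp) (le_refl 0),
      pvSlice_nil]
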